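-- pv_equiv track=rewrite | github.com/sim-sg/group-matcher | example_config.py | group_genders
-- ===== SOURCE A (Python) =====
-- def batch(arr, n=2):
--     ret = []
--     if not len(arr) // n:
--         return [arr]
--     for i in range(len(arr) // n):
--         at = arr[i * n : i * n + n]
--         if i + 1 >= len(arr) // n:
--             at = arr[i * n :]
--         ret.append(at)
--     return ret
--
-- def group_races(arr, n=2):
--     by_race = {}
--     for node in arr:
--         currnode_race = node["race"]
--         by_race[currnode_race] = by_race.get(currnode_race, []) + [node]
--     for race in list(by_race.keys()):
--         members = by_race[race]
--         if len(members) > 1: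
--             yield from batch(members, n=n)
--             del by_race[race]
--     yield from batch(sum(by_race.values(), []), n=n)
--
-- def group_genders(arr, n=2):
--     by_gender = {}
--     for node in arr:
--         by_gender[node["gender"]] = by_gender.get(node["gender"], []) + [node]
--     yield from group_races(by_gender.get(1, []), n=n)
--     if 1 in by_gender:
--         del by_gender[1]
--     yield from group_races(sum(list(by_gender.values()), []), n=n)
-- ===== SOURCE B (Python) =====
-- def batch(arr, n=2):
--     if len(arr) < 2 * n:
--         return [arr]
--     return [arr[:n]] + batch(arr[n:], n)
--
-- def group_races(arr, n=2):
--     seen = []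
--     for node in arr:
--         if node["race"] not in seen:
--             seen.append(node["race"])
--     singles = []
--     for r in seen:
--         members = [m for m in arr if m["race"] == r]
--         if len(members) > 1:
--             yield from batch(members, n)
--         else:
--             singles += members
--     yield from batch(singles, n)
--
-- def group_genders(arr, n=2):
--     yield from group_races([m for m in arr if m["gender"] == 1], n)
--     seen = []
--     for node in arr:
--         if node["gender"] not in seen:
--             seen.append(node["gender"])
--     rest = [m for g in seen if g != 1 for m in arr if m["gender"] == g]
--     yield from group_races(rest, n)
-- ===== Notes on version B (the rewrite author's own statement) =====
-- stated objective: alternative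
-- what changed: No dict buckets at all: batch becomes a recursive head-chunk/tail split instead of an index loop, and grouping is done by collecting each key's first-occurrence order once and then re-scanning the input with stable filters per key, partitioning multi-member race groups from singletons in one comprehension-style pass (no del, no sum-of-values).
-- outside the precondition, e.g. on group_genders([{'gender': 1, 'race': 0}], -1): A returns [[]], B raises RecursionError
import Mathlib
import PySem

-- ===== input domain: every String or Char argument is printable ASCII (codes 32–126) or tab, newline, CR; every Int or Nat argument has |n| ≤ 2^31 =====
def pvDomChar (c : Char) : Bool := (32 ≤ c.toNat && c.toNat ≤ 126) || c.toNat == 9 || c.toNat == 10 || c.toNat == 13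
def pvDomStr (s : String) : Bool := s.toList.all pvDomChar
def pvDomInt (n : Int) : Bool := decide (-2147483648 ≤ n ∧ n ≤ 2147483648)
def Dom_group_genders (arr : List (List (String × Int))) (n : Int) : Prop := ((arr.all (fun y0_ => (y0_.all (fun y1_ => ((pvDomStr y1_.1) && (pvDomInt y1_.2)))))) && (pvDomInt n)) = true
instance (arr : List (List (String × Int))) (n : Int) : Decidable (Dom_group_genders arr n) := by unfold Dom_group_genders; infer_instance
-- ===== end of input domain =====

-- B drops the hash buckets entirely: batch becomes a recursive head-chunk/tail split, and grouping
-- collects each key's first-occurrence order once and then re-scans the input with stable filters,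
-- partitioning multi-member race groups from singletons in one pass (alternative algorithm, not faster).

-- ===== PORT A =====
def pvBatchA (arr : List (List (String × Int))) (n : Int) : List (List (List (String × Int))) :=
  if PySem.Int.floordiv (arr.length : Int) n = 0 then [arr]
  else
    (PySem.List.pyRange 0 (PySem.Int.floordiv (arr.length : Int) n) 1).foldl
      (fun ret i =>
        ret ++ [if PySem.Int.floordiv (arr.length : Int) n ≤ i + 1
                then PySem.List.slice arr (some (i * n)) none
                else PySem.List.slice arr (some (i * n)) (some (i * n + n))]) []

def pvRacesA (arr : List (List (String × Int))) (n : Int) : List (List (List (String × Int))) :=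
  let byRace : PySem.Dict Int (List (List (String × Int))) :=
    arr.foldl (fun d node =>
      d.insert (PySem.Dict.getD ⟨node⟩ "race" 0)
        (d.getD (PySem.Dict.getD ⟨node⟩ "race" 0) [] ++ [node])) ⟨[]⟩
  let st :=
    byRace.keys.foldl (fun s race =>
      if 1 < (s.2.getD race []).length
      then (s.1 ++ pvBatchA (s.2.getD race []) n, s.2.erase race)
      else s)
    (([] : List (List (List (String × Int)))), byRace)
  st.1 ++ pvBatchA st.2.values.flatten n

def group_genders (arr : List (List (String × Int))) (n : Int) : List (List (List (String × Int))) :=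
  let byGender : PySem.Dict Int (List (List (String × Int))) :=
    arr.foldl (fun d node =>
      d.insert (PySem.Dict.getD ⟨node⟩ "gender" 0)
        (d.getD (PySem.Dict.getD ⟨node⟩ "gender" 0) [] ++ [node])) ⟨[]⟩
  let out1 := pvRacesA (byGender.getD 1 []) n
  let byGender2 := if byGender.contains 1 then byGender.erase 1 else byGender
  out1 ++ pvRacesA byGender2.values.flatten n

-- ===== PORT B =====
-- recursive batch; the 'n < 1' guard only totalizes it (the Python recursion does not terminate there;
-- those n are outside Pre_)
def pvBatchB (arr : List (List (String × Int))) (n : Int) : List (List (List (String × Int))) :=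
  if n < 1 then [arr]
  else if (arr.length : Int) < 2 * n then [arr]
  else arr.take n.toNat :: pvBatchB (arr.drop n.toNat) n
termination_by arr.length
decreasing_by simp only [List.length_drop]; omega

-- first-occurrence order of the keys of arr (B's 'seen' loop)
def pvSeen (key : List (String × Int) → Int) (arr : List (List (String × Int))) : List Int :=
  arr.foldl (fun s node => if key node ∈ s then s else s ++ [key node]) []

def pvRacesB (arr : List (List (String × Int))) (n : Int) : List (List (List (String × Int))) :=
  let seen := pvSeen (fun node => PySem.Dict.getD ⟨node⟩ "race" 0) arr
  let st :=
    seen.foldl (fun s r =>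
      let members := arr.filter (fun m => PySem.Dict.getD ⟨m⟩ "race" 0 == r)
      if 1 < members.length then (s.1 ++ pvBatchB members n, s.2) else (s.1, s.2 ++ members))
    (([] : List (List (List (String × Int)))), ([] : List (List (String × Int))))
  st.1 ++ pvBatchB st.2 n

def group_genders_alt (arr : List (List (String × Int))) (n : Int) : List (List (List (String × Int))) :=
  let ones := arr.filter (fun m => PySem.Dict.getD ⟨m⟩ "gender" 0 == 1)
  let seen := pvSeen (fun node => PySem.Dict.getD ⟨node⟩ "gender" 0) arr
  let rest := (seen.filter (fun g => g != 1)).flatMap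
    (fun g => arr.filter (fun m => PySem.Dict.getD ⟨m⟩ "gender" 0 == g))
  pvRacesB ones n ++ pvRacesB rest n

-- ===== PRECONDITION & SPEC =====
-- Pre_ excludes n ≤ 0 (n = 0 makes A's batch raise ZeroDivisionError; for n < 0 B's recursive batch
-- raises RecursionError), nodes missing a "gender" or "race" key (A raises KeyError), and nodes with
-- duplicate keys (a Python dict cannot hold them, so the association-list encoding is ambiguous there).
def Pre_group_genders (arr : List (List (String × Int))) (n : Int) : Prop :=
  1 ≤ n ∧ ∀ node ∈ arr, (node.map Prod.fst).Nodup ∧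
    "gender" ∈ node.map Prod.fst ∧ "race" ∈ node.map Prod.fst
instance (arr : List (List (String × Int))) (n : Int) : Decidable (Pre_group_genders arr n) := by unfold Pre_group_genders; infer_instance
def pvWitness_group_genders : (List (List (String × Int))) × Int := ([[("gender", 1), ("race", 0)]], 2)
def Spec_group_genders (arr : List (List (String × Int))) (n : Int) (out : List (List (List (String × Int)))) : Prop := out = group_genders_alt arr n
instance (arr : List (List (String × Int))) (n : Int) (out : List (List (List (String × Int)))) : Decidable (Spec_group_genders arr n out) := by unfold Spec_group_genders; infer_instance

-- ===== CLAIM =====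
def Claim_equal_group_genders : Prop := ∀ (arr : List (List (String × Int))) (n : Int), Dom_group_genders arr n → Pre_group_genders arr n → Spec_group_genders arr n (group_genders arr n)

-- ===== LEMMAS AND PROOFS =====

theorem pvFoldlAppSingle {α β : Type} (f : β → α) (l : List β) (init : List α) :
    l.foldl (fun r i => r ++ [f i]) init = init ++ l.map f := by
  induction l generalizing init with
  | nil => simp
  | cons x xs ih => simp [ih]

theorem pvBatchA_map (arr : List (List (String × Int))) (n : Int)
    (h : ¬ PySem.Int.floordiv (arr.length : Int) n = 0) :
    pvBatchA arr n = (List.range (PySem.Int.floordiv (arr.length : Int) n).toNat).map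
      (fun k : Nat => if PySem.Int.floordiv (arr.length : Int) n ≤ (k : Int) + 1
        then PySem.List.slice arr (some ((k : Int) * n)) none
        else PySem.List.slice arr (some ((k : Int) * n)) (some ((k : Int) * n + n))) := by
  unfold pvBatchA
  rw [if_neg h, PySem.List.pyRange_one, pvFoldlAppSingle, List.nil_append, List.map_map,
      sub_zero]
  apply List.map_congr_left
  intro k _
  simp [Function.comp_def]

theorem pvBatchA_small (arr : List (List (String × Int))) (n : Int) (hn : 1 ≤ n)
    (h : (arr.length : Int) < 2 * n) : pvBatchA arr n = [arr] := by
  have hq0 : (0 : Int) ≤ PySem.Int.floordiv (arr.length : Int) n := by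
    rw [PySem.Int.le_floordiv_iff_mul_le (by omega)]
    simpa using Int.natCast_nonneg arr.length
  have hq2 : PySem.Int.floordiv (arr.length : Int) n < 2 := by
    rw [PySem.Int.floordiv_lt_iff_lt_mul (by omega)]
    omega
  by_cases h0 : PySem.Int.floordiv (arr.length : Int) n = 0
  · unfold pvBatchA; rw [if_pos h0]
  · have h1 : PySem.Int.floordiv (arr.length : Int) n = 1 := by omega
    rw [pvBatchA_map _ _ h0, h1]
    norm_num [List.range_one]

theorem pvBatchA_step (arr : List (List (String × Int))) (N : Nat) (hN : 1 ≤ N)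
    (h : 2 * N ≤ arr.length) :
    pvBatchA arr (N : Int) = arr.take N :: pvBatchA (arr.drop N) (N : Int) := by
  have hm : arr.length / N = (arr.length - N) / N + 1 := by
    conv_lhs => rw [show arr.length = (arr.length - N) + N by omega]
    rw [Nat.add_div_right _ (by omega)]
  have hm1 : 1 ≤ (arr.length - N) / N := (Nat.one_le_div_iff (by omega)).mpr (by omega)
  have hq : PySem.Int.floordiv ((arr.length : Nat) : Int) (N : Int)
      = (((arr.length - N) / N + 1 : Nat) : Int) := by
    rw [PySem.Int.floordiv_natCast, hm]
  have hq' : PySem.Int.floordiv (((arr.drop N).length : Nat) : Int) (N : Int)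
      = (((arr.length - N) / N : Nat) : Int) := by
    rw [List.length_drop, PySem.Int.floordiv_natCast]
  rw [pvBatchA_map _ _ (by rw [hq]; omega),
      pvBatchA_map _ _ (by rw [hq']; omega)]
  rw [hq, hq', Int.toNat_natCast, Int.toNat_natCast, List.range_succ_eq_map, List.map_cons,
      List.map_map]
  congr 1
  · dsimp only
    rw [if_neg (show ¬ ((((arr.length - N) / N + 1 : Nat)) : Int) ≤ ((0 : Nat) : Int) + 1 by
      push_cast; omega)]
    rw [show ((0 : Nat) : Int) * ((N : Nat) : Int) = ((0 : Nat) : Int) by simp,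
        show ((0 : Nat) : Int) + ((N : Nat) : Int) = ((N : Nat) : Int) by simp]
    rw [show PySem.List.slice arr (some ((0 : Nat) : Int)) (some ((N : Nat) : Int))
        = PySem.List.slice arr (some (((0 : Nat) : Int))) (some (((0 : Nat) : Int) + ((N : Nat) : Int))) by norm_num]
    rw [PySem.List.slice_natCast_add arr 0 N]
    simp
  · apply List.map_congr_left
    intro k hk
    have hkm : k < (arr.length - N) / N := List.mem_range.mp hk
    dsimp only [Function.comp_def]
    have e1 : ((Nat.succ k : Nat) : Int) * ((N : Nat) : Int) = (((k + 1) * N : Nat) : Int) := by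
      push_cast; ring
    have e2 : ((k : Nat) : Int) * ((N : Nat) : Int) = ((k * N : Nat) : Int) := by
      push_cast; ring
    by_cases hlast : (arr.length - N) / N ≤ k + 1
    · rw [if_pos (show ((((arr.length - N) / N + 1 : Nat)) : Int) ≤ ((Nat.succ k : Nat) : Int) + 1 by
          push_cast; omega),
        if_pos (show ((((arr.length - N) / N : Nat)) : Int) ≤ ((k : Nat) : Int) + 1 by
          push_cast; omega)]
      rw [e1, e2, PySem.List.slice_from_natCast, PySem.List.slice_from_natCast, List.drop_drop]
      congr 1
      ring
    · rw [if_neg (show ¬ ((((arr.length - N) / N + 1 : Nat)) : Int) ≤ ((Nat.succ k : Nat) : Int) + 1 by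
          push_cast; omega),
        if_neg (show ¬ ((((arr.length - N) / N : Nat)) : Int) ≤ ((k : Nat) : Int) + 1 by
          push_cast; omega)]
      rw [e1, e2, show (((k + 1) * N : Nat) : Int) + ((N : Nat) : Int) = ((((k + 1) * N + N : Nat)) : Int) by push_cast; ring,
        show ((k * N : Nat) : Int) + ((N : Nat) : Int) = (((k * N + N : Nat)) : Int) by push_cast; ring]
      rw [show (((k + 1) * N + N : Nat) : Int) = (((k + 1) * N : Nat) : Int) + ((N : Nat) : Int) by push_cast; ring]
      rw [show ((k * N + N : Nat) : Int) = ((k * N : Nat) : Int) + ((N : Nat) : Int) by push_cast; ring]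
      rw [PySem.List.slice_natCast_add, PySem.List.slice_natCast_add, List.drop_drop]
      congr 2
      ring

theorem pvBatch_eq (n : Int) (hn : 1 ≤ n) :
    ∀ (arr : List (List (String × Int))), pvBatchA arr n = pvBatchB arr n := by
  obtain ⟨N, rfl⟩ : ∃ N : Nat, n = (N : Int) := ⟨n.toNat, (Int.toNat_of_nonneg (by omega)).symm⟩
  have hN : 1 ≤ N := by exact_mod_cast hn
  suffices h : ∀ (L : Nat) (arr : List (List (String × Int))), arr.length ≤ L →
      pvBatchA arr (N : Int) = pvBatchB arr (N : Int) by
    exact fun arr => h arr.length arr le_rfl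
  intro L
  induction L with
  | zero =>
    intro arr hlen
    have : arr = [] := List.eq_nil_of_length_eq_zero (by omega)
    subst this
    rw [pvBatchB, if_neg (by omega), if_pos (by simp; omega)]
    exact pvBatchA_small _ _ hn (by simp; omega)
  | succ L IH =>
    intro arr hlen
    by_cases hsmall : arr.length < 2 * N
    · rw [pvBatchB, if_neg (by omega), if_pos (by exact_mod_cast hsmall)]
      exact pvBatchA_small _ _ hn (by exact_mod_cast hsmall)
    · rw [pvBatchA_step arr N hN (by omega), pvBatchB, if_neg (by omega),
          if_neg (by push_cast; omega)]
      rw [Int.toNat_natCast]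
      rw [IH (arr.drop N) (by simp; omega)]

-- first-occurrence fold with a general accumulator (proof generalisation of pvSeen)
def pvOccs (key : List (String × Int) → Int) (seen : List Int)
    (arr : List (List (String × Int))) : List Int :=
  arr.foldl (fun s node => if key node ∈ s then s else s ++ [key node]) seen

theorem pvSeen_eq_occs (key : List (String × Int) → Int) (arr : List (List (String × Int))) :
    pvSeen key arr = pvOccs key [] arr := rfl

theorem pvOccs_nodup (key : List (String × Int) → Int) (arr : List (List (String × Int)))
    (seen : List Int) (h : seen.Nodup) : (pvOccs key seen arr).Nodup := by
  induction arr generalizing seen with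
  | nil => exact h
  | cons x xs ih =>
    simp only [pvOccs, List.foldl_cons]
    by_cases hx : key x ∈ seen
    · rw [if_pos hx]; exact ih seen h
    · rw [if_neg hx]
      exact ih _ (by simp only [List.nodup_append, List.nodup_cons]; exact ⟨h, by simp, fun a ha b hb => by simp at hb; subst hb; exact fun e => hx (e ▸ ha)⟩)

theorem pvSeen_mem_occs (key : List (String × Int) → Int) (arr : List (List (String × Int)))
    (seen : List Int) (r : Int) (hr : r ∈ seen) : r ∈ pvOccs key seen arr := by
  induction arr generalizing seen with
  | nil => exact hr
  | cons x xs ih =>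
    simp only [pvOccs, List.foldl_cons]
    by_cases hx : key x ∈ seen
    · rw [if_pos hx]; exact ih _ hr
    · rw [if_neg hx]; exact ih _ (by simp [hr])

theorem pvMem_occs (key : List (String × Int) → Int) (arr : List (List (String × Int)))
    (seen : List Int) (m : List (String × Int)) (hm : m ∈ arr) :
    key m ∈ pvOccs key seen arr := by
  induction arr generalizing seen with
  | nil => cases hm
  | cons x xs ih =>
    simp only [pvOccs, List.foldl_cons]
    rcases List.mem_cons.mp hm with rfl | hm'
    · by_cases hx : key m ∈ seen
      · rw [if_pos hx]; exact pvSeen_mem_occs key xs _ _ hx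
      · rw [if_neg hx]; exact pvSeen_mem_occs key xs _ _ (by simp)
    · by_cases hx : key x ∈ seen <;> simp only [hx, if_true, if_false] <;>
        exact ih _ hm'

theorem pvGetMk (seen : List Int) (g : Int → List (List (String × Int))) (r : Int) :
    (PySem.Dict.mk (seen.map (fun x => (x, g x)))).get? r
    = if r ∈ seen then some (g r) else none := by
  induction seen with
  | nil => simp [PySem.Dict.get?]
  | cons a tl ih =>
    rw [List.map_cons, PySem.Dict.get?_mk_cons]
    by_cases har : a = r
    · subst har; simp
    · simp only [List.mem_cons]
      rw [if_neg (by simpa using har), ih]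
      by_cases hrt : r ∈ tl
      · simp [hrt]
      · simp [hrt]; exact fun e => har e.symm

-- the dict-bucketing fold of A, characterised: items = first-occurrence keys paired with filters
theorem pvBuild (key : List (String × Int) → Int) :
    ∀ (arr pref : List (List (String × Int))) (seen : List Int),
    seen.Nodup → (∀ m ∈ pref, key m ∈ seen) →
    arr.foldl (fun d node => d.insert (key node) (d.getD (key node) [] ++ [node]))
      (PySem.Dict.mk (seen.map (fun r => (r, pref.filter (fun m => key m == r)))))
    = PySem.Dict.mk ((pvOccs key seen arr).map
        (fun r => (r, (pref ++ arr).filter (fun m => key m == r)))) := by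
  intro arr
  induction arr with
  | nil => intro pref seen _ _; simp [pvOccs]
  | cons x xs ih =>
    intro pref seen h1 h2
    simp only [List.foldl_cons]
    have hkeys : (PySem.Dict.mk (seen.map (fun r => (r, pref.filter (fun m => key m == r))))).keys = seen := by
      simp only [PySem.Dict.keys, PySem.Dict.items, List.map_map]
      exact (List.map_congr_left (g := id) (fun a _ => rfl)).trans (List.map_id seen)
    have hget : (PySem.Dict.mk (seen.map (fun r => (r, pref.filter (fun m => key m == r))))).get? (key x)
        = if key x ∈ seen then some (pref.filter (fun m => key m == key x)) else none :=
      pvGetMk seen _ (key x)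
    by_cases hr : key x ∈ seen
    · have hgd : (PySem.Dict.mk (seen.map (fun r => (r, pref.filter (fun m => key m == r))))).getD (key x) []
          = pref.filter (fun m => key m == key x) := by
        rw [PySem.Dict.getD_eq_get?_getD, hget, if_pos hr]; rfl
      have hcont : (PySem.Dict.mk (seen.map (fun r => (r, pref.filter (fun m => key m == r))))).contains (key x) = true := by
        rw [PySem.Dict.contains_eq_decide_mem_keys, hkeys]; simpa using hr
      have hins : ((PySem.Dict.mk (seen.map (fun r => (r, pref.filter (fun m => key m == r))))).insert
            (key x) (pref.filter (fun m => key m == key x) ++ [x]))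
          = PySem.Dict.mk (seen.map (fun r => (r, (pref ++ [x]).filter (fun m => key m == r)))) := by
        apply PySem.Dict.ext
        rw [PySem.Dict.items_insert_of_contains _ _ hcont]
        simp only [PySem.Dict.items, List.map_map]
        apply List.map_congr_left
        intro a _
        by_cases ha : a = key x
        · subst ha; simp [List.filter_append]
        · simp only [Function.comp]
          rw [if_neg (by simpa using (fun e => ha (by simpa using e)))]
          simp only [List.filter_append, List.filter_cons]
          rw [if_neg (by simpa using (fun e => ha e.symm))]
          simp
      rw [hgd, hins]
      have hocc : pvOccs key seen (x :: xs) = pvOccs key seen xs := by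
        simp only [pvOccs, List.foldl_cons, if_pos hr]
      rw [hocc, List.append_cons pref x xs]
      exact ih (pref ++ [x]) seen h1 (by
        intro m hm
        rcases List.mem_append.mp hm with h | h
        · exact h2 m h
        · simp at h; subst h; exact hr)
    · have hgd : (PySem.Dict.mk (seen.map (fun r => (r, pref.filter (fun m => key m == r))))).getD (key x) []
          = [] := by
        rw [PySem.Dict.getD_eq_get?_getD, hget, if_neg hr]; rfl
      have hcont : (PySem.Dict.mk (seen.map (fun r => (r, pref.filter (fun m => key m == r))))).contains (key x) = false := by
        rw [PySem.Dict.contains_eq_decide_mem_keys, hkeys]; simpa using hr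
      have hpref : pref.filter (fun m => key m == key x) = [] := by
        apply List.filter_eq_nil_iff.mpr
        intro m hm
        simp only [beq_iff_eq, decide_eq_false_iff_not]
        intro e
        exact hr (e ▸ h2 m hm)
      have hins : ((PySem.Dict.mk (seen.map (fun r => (r, pref.filter (fun m => key m == r))))).insert
            (key x) ([] ++ [x]))
          = PySem.Dict.mk ((seen ++ [key x]).map (fun r => (r, (pref ++ [x]).filter (fun m => key m == r)))) := by
        apply PySem.Dict.ext
        rw [PySem.Dict.items_insert_of_not_contains _ _ hcont]
        simp only [PySem.Dict.items, List.map_append, List.map_cons, List.map_nil]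
        congr 1
        · apply List.map_congr_left
          intro a ha
          simp only [List.filter_append, List.filter_cons]
          rw [if_neg (by simpa using (fun e : key x = a => hr (e ▸ ha)))]
          simp
        · simp [List.filter_append, hpref]
      rw [hgd, hins]
      have hocc : pvOccs key seen (x :: xs) = pvOccs key (seen ++ [key x]) xs := by
        simp only [pvOccs, List.foldl_cons, if_neg hr]
      rw [hocc, List.append_cons pref x xs]
      exact ih (pref ++ [x]) (seen ++ [key x])
        (by simp only [List.nodup_append, List.nodup_cons]
            exact ⟨h1, by simp, fun a ha b hb => by simp at hb; subst hb; exact fun e => hr (e ▸ ha)⟩)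
        (by intro m hm
            rcases List.mem_append.mp hm with h | h
            · exact List.mem_append_left _ (h2 m h)
            · simp at h; subst h; simp)

-- A's loop over the snapshot of keys, erasing multi-member groups, characterised on the items list.
theorem pvLoopA (n : Int) (l pre : List (Int × List (List (String × Int))))
    (out0 : List (List (List (String × Int))))
    (h : ((pre ++ l).map Prod.fst).Nodup) :
    (l.map Prod.fst).foldl
      (fun s race =>
        if 1 < (s.2.getD race ([] : List (List (String × Int)))).length
        then (s.1 ++ pvBatchA (s.2.getD race []) n, s.2.erase race) else s)
      (out0, PySem.Dict.mk (pre ++ l))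
    = (out0 ++ (l.filter (fun p => decide (1 < p.2.length))).flatMap (fun p => pvBatchA p.2 n),
       PySem.Dict.mk (pre ++ l.filter (fun p => !decide (1 < p.2.length)))) := by
  induction l generalizing pre out0 with
  | nil => simp
  | cons kv l ih =>
    obtain ⟨k, v⟩ := kv
    have hnd := h
    simp only [List.map_append, List.map_cons, List.nodup_append, List.nodup_cons] at hnd
    have hk_pre : ∀ p ∈ pre, p.1 ≠ k := by
      intro p hp heq
      exact hnd.2.2 p.1 (List.mem_map_of_mem hp) k (by simp) heq
    have hk_l : ∀ p ∈ l, p.1 ≠ k := by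
      intro p hp heq
      exact hnd.2.1.1 (heq ▸ List.mem_map_of_mem hp)
    have hget : (PySem.Dict.mk (pre ++ (k, v) :: l)).getD k ([] : List (List (String × Int))) = v := by
      simp only [PySem.Dict.getD, PySem.Dict.get?]
      rw [List.find?_append]
      have hpre : pre.find? (fun p => p.1 == k) = none :=
        List.find?_eq_none.mpr (by intro p hp; simpa using hk_pre p hp)
      simp [hpre]
    have herase : (PySem.Dict.mk (pre ++ (k, v) :: l)).erase k = PySem.Dict.mk (pre ++ l) := by
      simp only [PySem.Dict.erase, List.filter_append, List.filter_cons]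
      have h1 : pre.filter (fun p => !p.1 == k) = pre :=
        List.filter_eq_self.mpr (by intro p hp; simpa using hk_pre p hp)
      have h2 : l.filter (fun p => !p.1 == k) = l :=
        List.filter_eq_self.mpr (by intro p hp; simpa using hk_l p hp)
      simp [h1, h2]
    simp only [List.map_cons, List.foldl_cons, hget]
    by_cases hv : 1 < v.length
    · rw [if_pos hv]
      simp only [herase]
      rw [ih pre (out0 ++ pvBatchA v n) (by
        simp only [List.map_append, List.nodup_append]
        refine ⟨hnd.1, hnd.2.1.2, ?_⟩
        intro a ha b hb
        exact hnd.2.2 a ha b (List.mem_cons_of_mem _ hb))]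
      simp [hv, List.append_assoc]
    · rw [if_neg hv]
      have hassoc : pre ++ (k, v) :: l = (pre ++ [(k, v)]) ++ l := by simp
      rw [hassoc, ih (pre ++ [(k, v)]) out0 (by rw [← hassoc]; exact h)]
      simp [hv]

theorem pvLoopB (n : Int) (key : List (String × Int) → Int) (arr : List (List (String × Int)))
    (occ : List Int) (out0 : List (List (List (String × Int)))) (s0 : List (List (String × Int))) :
    occ.foldl (fun s r =>
        let members := arr.filter (fun m => key m == r)
        if 1 < members.length then (s.1 ++ pvBatchB members n, s.2) else (s.1, s.2 ++ members))
      (out0, s0)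
    = (out0 ++ ((occ.map (fun r => arr.filter (fun m => key m == r))).filter
          (fun g => decide (1 < g.length))).flatMap (fun g => pvBatchB g n),
       s0 ++ ((occ.map (fun r => arr.filter (fun m => key m == r))).filter
          (fun g => !decide (1 < g.length))).flatten) := by
  induction occ generalizing out0 s0 with
  | nil => simp
  | cons r occ ih =>
    by_cases hg : 1 < (arr.filter (fun m => key m == r)).length
    · simp [hg, ih, List.append_assoc]
    · simp [hg, ih, List.append_assoc]

theorem pvKeysMk (seen : List Int) (g : Int → List (List (String × Int))) :
    (PySem.Dict.mk (seen.map (fun r => (r, g r)))).keys = seen := by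
  simp only [PySem.Dict.keys, PySem.Dict.items, List.map_map]
  exact (List.map_congr_left (g := id) (fun a _ => rfl)).trans (List.map_id seen)

-- both race-grouping passes, for a generic key function
theorem pvRacesGen (key : List (String × Int) → Int) (arr : List (List (String × Int))) (n : Int)
    (hn : 1 ≤ n) :
    (let byRace : PySem.Dict Int (List (List (String × Int))) :=
       arr.foldl (fun d node => d.insert (key node) (d.getD (key node) [] ++ [node])) ⟨[]⟩
     let st :=
       byRace.keys.foldl (fun s race =>
         if 1 < (s.2.getD race []).length
         then (s.1 ++ pvBatchA (s.2.getD race []) n, s.2.erase race)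
         else s)
       (([] : List (List (List (String × Int)))), byRace)
     st.1 ++ pvBatchA st.2.values.flatten n)
    = (let seen := pvOccs key [] arr
       let st :=
         seen.foldl (fun s r =>
           let members := arr.filter (fun m => key m == r)
           if 1 < members.length then (s.1 ++ pvBatchB members n, s.2) else (s.1, s.2 ++ members))
         (([] : List (List (List (String × Int)))), ([] : List (List (String × Int))))
       st.1 ++ pvBatchB st.2 n) := by
  have hbuild := pvBuild key arr [] [] List.nodup_nil (by intro m h; cases h)
  simp only [List.map_nil, List.nil_append] at hbuild
  have hnd2 : ((pvOccs key [] arr).map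
      (fun r => (r, arr.filter (fun m => key m == r)))).map Prod.fst = pvOccs key [] arr := by
    rw [List.map_map]
    exact (List.map_congr_left (g := id) (fun a _ => rfl)).trans (List.map_id _)
  have hA := pvLoopA n ((pvOccs key [] arr).map
      (fun r => (r, arr.filter (fun m => key m == r)))) [] []
      (by rw [List.nil_append, hnd2]; exact pvOccs_nodup key arr [] List.nodup_nil)
  simp only [List.nil_append, hnd2] at hA
  simp only [hbuild, pvKeysMk, hA, pvLoopB n key arr (pvOccs key [] arr) [] [], List.nil_append]
  simp only [PySem.Dict.values, PySem.Dict.items, List.filter_map, List.flatMap_map,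
    List.map_map, Function.comp, pvBatch_eq n hn]
  simp only [Function.comp_def]

theorem pvRaces_eq (arr : List (List (String × Int))) (n : Int) (hn : 1 ≤ n) :
    pvRacesA arr n = pvRacesB arr n := by
  unfold pvRacesA pvRacesB
  exact pvRacesGen (fun node => PySem.Dict.getD ⟨node⟩ "race" 0) arr n hn

-- both gender passes, for a generic key function
theorem pvTopGen (key : List (String × Int) → Int) (arr : List (List (String × Int))) (n : Int)
    (hn : 1 ≤ n) :
    (let byGender : PySem.Dict Int (List (List (String × Int))) :=
       arr.foldl (fun d node => d.insert (key node) (d.getD (key node) [] ++ [node])) ⟨[]⟩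
     let out1 := pvRacesA (byGender.getD 1 []) n
     let byGender2 := if byGender.contains 1 then byGender.erase 1 else byGender
     out1 ++ pvRacesA byGender2.values.flatten n)
    = (let ones := arr.filter (fun m => key m == 1)
       let seen := pvSeen key arr
       let rest := (seen.filter (fun g => g != 1)).flatMap (fun g => arr.filter (fun m => key m == g))
       pvRacesB ones n ++ pvRacesB rest n) := by
  have hbuild := pvBuild key arr [] [] List.nodup_nil (by intro m h; cases h)
  simp only [List.map_nil, List.nil_append] at hbuild
  have hget1 : (PySem.Dict.mk ((pvOccs key [] arr).map
      (fun r => (r, arr.filter (fun m => key m == r))))).getD 1 []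
      = arr.filter (fun m => key m == 1) := by
    rw [PySem.Dict.getD_eq_get?_getD, pvGetMk]
    by_cases h1 : (1 : Int) ∈ pvOccs key [] arr
    · simp [h1]
    · rw [if_neg h1]
      have hnil : arr.filter (fun m => key m == 1) = [] := by
        apply List.filter_eq_nil_iff.mpr
        intro m hm
        simp only [beq_iff_eq]
        intro e
        exact h1 (e ▸ pvMem_occs key arr [] m hm)
      simp [hnil]
  have hcont : (PySem.Dict.mk ((pvOccs key [] arr).map
      (fun r => (r, arr.filter (fun m => key m == r))))).contains 1
      = decide ((1 : Int) ∈ pvOccs key [] arr) := by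
    rw [PySem.Dict.contains_eq_decide_mem_keys, pvKeysMk]
  have hrest : (if (PySem.Dict.mk ((pvOccs key [] arr).map
        (fun r => (r, arr.filter (fun m => key m == r))))).contains 1
      then (PySem.Dict.mk ((pvOccs key [] arr).map
        (fun r => (r, arr.filter (fun m => key m == r))))).erase 1
      else PySem.Dict.mk ((pvOccs key [] arr).map
        (fun r => (r, arr.filter (fun m => key m == r))))).values.flatten
      = ((pvOccs key [] arr).filter (fun g => g != 1)).flatMap
          (fun g => arr.filter (fun m => key m == g)) := by
    rw [hcont]
    by_cases h1 : (1 : Int) ∈ pvOccs key [] arr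
    · simp only [h1, decide_true, if_true]
      simp [PySem.Dict.erase, PySem.Dict.values, PySem.Dict.items, List.filter_map,
        List.map_map, Function.comp_def, List.flatMap_def, bne]
    · simp only [h1, decide_false, Bool.false_eq_true, if_false]
      have hfil : (pvOccs key [] arr).filter (fun g => g != 1) = pvOccs key [] arr := by
        apply List.filter_eq_self.mpr
        intro g hg
        simp only [bne_iff_ne, ne_eq, decide_eq_true_eq]
        intro e
        exact h1 (e ▸ hg)
      rw [hfil]
      simp [PySem.Dict.values, PySem.Dict.items, List.map_map, Function.comp_def,
        List.flatMap_def]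
  have hR : ∀ x, pvRacesA x n = pvRacesB x n := fun x => pvRaces_eq x n hn
  simp only [hbuild, hget1, hrest, hR, pvSeen_eq_occs]

-- ===== VERDICT =====
theorem group_genders_spec : Claim_equal_group_genders := by
  intro arr n _ hpre
  obtain ⟨hn, -⟩ := hpre
  unfold Spec_group_genders group_genders group_genders_alt
  exact pvTopGen (fun node => PySem.Dict.getD ⟨node⟩ "gender" 0) arr n hn
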